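-- pv_equiv track=rewrite | github.com/nishantsubramani/LSTM-Ensemble-Methods- | updated_reader.py | get_sentence_list
-- ===== SOURCE A (Python) =====
-- def get_sentence_list(data, eos_id, reverse = False):
-- 		sentence_list = []
-- 		new_sentence = []
-- 		for i in range(len(data)):
-- 				new_word = data[i]
-- 				if (reverse and new_word == eos_id and len(new_sentence) > 0):
-- 						sentence_list.append(new_sentence)
-- 						new_sentence = []
-- 						new_sentence.append(new_word)
-- 				elif reverse == False and new_word == eos_id:
-- 						new_sentence.append(new_word)
-- 						sentence_list.append(new_sentence)
-- 						new_sentence = []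
-- 				else:
-- 						new_sentence.append(new_word)
-- 		if len(sentence_list) > 0:
-- 				sentence_list.append(new_sentence)
-- 		return(sentence_list)
-- ===== SOURCE B (Python) =====
-- def get_sentence_list(data, eos_id, reverse=False):
--     # Boundary-index approach: collect cut positions once, then emit slices.
--     if reverse:
--         cuts = [i for i, w in enumerate(data) if w == eos_id and i > 0]
--     else:
--         cuts = [i + 1 for i, w in enumerate(data) if w == eos_id]
--     if not cuts:
--         return []
--     bounds = [0] + cuts + [len(data)]
--     return [data[a:b] for a, b in zip(bounds, bounds[1:])]
-- ===== Notes on version B (the rewrite author's own statement) =====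
-- stated objective: alternative
-- what changed: Replaces the single-pass accumulator loop (building each sentence word by word with flush-on-EOS state) by a boundary-index method: one scan collects cut positions, then the result is built by slicing data between consecutive bounds.
import Mathlib
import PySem

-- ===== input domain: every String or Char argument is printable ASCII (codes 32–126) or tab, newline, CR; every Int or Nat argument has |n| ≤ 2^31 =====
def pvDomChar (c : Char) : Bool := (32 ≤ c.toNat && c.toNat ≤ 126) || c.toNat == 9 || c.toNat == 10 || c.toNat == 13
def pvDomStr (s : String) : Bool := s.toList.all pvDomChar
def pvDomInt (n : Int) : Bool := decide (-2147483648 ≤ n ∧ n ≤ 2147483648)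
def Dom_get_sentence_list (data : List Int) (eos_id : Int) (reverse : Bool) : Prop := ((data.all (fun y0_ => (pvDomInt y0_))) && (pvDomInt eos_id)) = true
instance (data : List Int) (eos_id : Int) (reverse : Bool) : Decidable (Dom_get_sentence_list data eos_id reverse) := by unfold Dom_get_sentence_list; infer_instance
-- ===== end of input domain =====

-- B replaces A's accumulator loop by a collect-cut-indices-then-slice decomposition (alternative, same cost).

-- ===== PORT A =====
-- the loop body of A, as a fold step over (sentence_list, new_sentence)
def pvStepA (eos_id : Int) (reverse : Bool) (st : List (List Int) × List Int) (new_word : Int) :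
    List (List Int) × List Int :=
  if reverse && new_word == eos_id && decide (0 < st.2.length) then
    (st.1 ++ [st.2], [new_word])
  else if reverse == false && new_word == eos_id then
    (st.1 ++ [st.2 ++ [new_word]], [])
  else
    (st.1, st.2 ++ [new_word])

def get_sentence_list (data : List Int) (eos_id : Int) (reverse : Bool) : List (List Int) :=
  let st := (PySem.List.pyRange 0 (PySem.List.len data) 1).foldl
    (fun st i => pvStepA eos_id reverse st (PySem.List.pyGetD data i 0)) ([], [])
  if 0 < st.1.length then st.1 ++ [st.2] else st.1

-- ===== PORT B =====
def get_sentence_list_alt (data : List Int) (eos_id : Int) (reverse : Bool) : List (List Int) :=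
  let cuts : List Int :=
    if reverse then
      ((PySem.List.enumerate data 0).filter (fun p => p.2 == eos_id && decide (0 < p.1))).map (fun p => p.1)
    else
      ((PySem.List.enumerate data 0).filter (fun p => p.2 == eos_id)).map (fun p => p.1 + 1)
  if cuts.isEmpty then []
  else
    let bounds : List Int := 0 :: cuts ++ [(data.length : Int)]
    (bounds.zip bounds.tail).map (fun ab => PySem.List.slice data (some ab.1) (some ab.2))

-- ===== PRECONDITION & SPEC =====
def Spec_get_sentence_list (data : List Int) (eos_id : Int) (reverse : Bool) (out : List (List Int)) : Prop := out = get_sentence_list_alt data eos_id reverse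
instance (data : List Int) (eos_id : Int) (reverse : Bool) (out : List (List Int)) : Decidable (Spec_get_sentence_list data eos_id reverse out) := by unfold Spec_get_sentence_list; infer_instance

-- ===== CLAIM (what is proved, stated in full; the proofs are below) =====
def Claim_equal_get_sentence_list : Prop := ∀ (data : List Int) (eos_id : Int) (reverse : Bool), Dom_get_sentence_list data eos_id reverse → Spec_get_sentence_list data eos_id reverse (get_sentence_list data eos_id reverse)

-- ===== LEMMAS AND PROOFS =====

-- prepend ns onto the first group (A's pending new_sentence absorbed into what follows)
def consHead (ns : List Int) : List (List Int) → List (List Int)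
  | [] => [ns]
  | g :: gs => (ns ++ g) :: gs

-- all indices (as naturals) where data carries the eos id
def cutsAllN (e : Int) : List Int → List Nat
  | [] => []
  | w :: rest => (if w = e then [0] else []) ++ (cutsAllN e rest).map (· + 1)

-- reference splitters (forward / reverse flavours of the loop's net effect, tail group included)
def refF (e : Int) : List Int → List (List Int)
  | [] => [[]]
  | w :: rest => if w = e then [w] :: refF e rest else consHead [w] (refF e rest)

def refR (e : Int) : List Int → List (List Int)
  | [] => [[]]
  | w :: rest => if w = e then [] :: consHead [w] (refR e rest) else consHead [w] (refR e rest)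

def intsOf : List Nat → List Int
  | [] => []
  | c :: cs => (c : Int) :: intsOf cs

def segOf (data : List Int) (bounds : List Int) : List (List Int) :=
  (bounds.zip bounds.tail).map (fun ab => PySem.List.slice data (some ab.1) (some ab.2))

def fullSeg (data : List Int) (cs : List Nat) : List (List Int) :=
  segOf data (intsOf (0 :: cs ++ [data.length]))

theorem intsOf_nil : intsOf [] = [] := rfl

theorem intsOf_cons (c : Nat) (cs : List Nat) : intsOf (c :: cs) = (c : Int) :: intsOf cs := rfl

theorem intsOf_append (a b : List Nat) : intsOf (a ++ b) = intsOf a ++ intsOf b := by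
  induction a with
  | nil => rfl
  | cons c cs ih => rw [List.cons_append, intsOf_cons, intsOf_cons, List.cons_append, ih]

theorem intsOf_shift (cs : List Nat) : intsOf (cs.map (· + 1)) = (intsOf cs).map (· + 1) := by
  induction cs with
  | nil => rfl
  | cons c t ih =>
    rw [List.map_cons, intsOf_cons, intsOf_cons, List.map_cons, ih]
    push_cast
    rfl

theorem consHead_consHead (a b : List Int) (X : List (List Int)) :
    consHead a (consHead b X) = consHead (a ++ b) X := by
  cases X <;> simp [consHead]

theorem consHead_nil {X : List (List Int)} (h : X ≠ []) : consHead [] X = X := by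
  cases X <;> simp_all [consHead]

theorem refF_ne_nil (e : Int) (data : List Int) : refF e data ≠ [] := by
  cases data with
  | nil => simp [refF]
  | cons w rest =>
    simp only [refF]
    split
    · simp
    · cases refF e rest <;> simp [consHead]

theorem segOf_cons2 (data : List Int) (a b : Int) (rest : List Int) :
    segOf data (a :: b :: rest) = PySem.List.slice data (some a) (some b) :: segOf data (b :: rest) := rfl

theorem seg_shift (w : Int) (data : List Int) (bs : List Nat) :
    segOf (w :: data) (intsOf (bs.map (· + 1))) = segOf data (intsOf bs) := by
  induction bs with
  | nil => rfl
  | cons b1 t ih =>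
    cases t with
    | nil => rfl
    | cons b2 bs' =>
      have hd : PySem.List.slice (w :: data) (some ((b1 + 1 : Nat) : Int)) (some ((b2 + 1 : Nat) : Int))
          = PySem.List.slice data (some ((b1 : Nat) : Int)) (some ((b2 : Nat) : Int)) := by
        rw [PySem.List.slice_natCast, PySem.List.slice_natCast]
        simp [Nat.succ_sub_succ]
      rw [List.map_cons, List.map_cons, intsOf_cons, intsOf_cons, segOf_cons2,
          intsOf_cons, intsOf_cons, segOf_cons2, hd]
      have ih' := ih
      rw [List.map_cons, intsOf_cons] at ih'
      rw [intsOf_cons] at ih'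
      rw [ih']

theorem fullSeg_cons (w : Int) (data : List Int) (cs : List Nat) :
    fullSeg (w :: data) (cs.map (· + 1)) = consHead [w] (fullSeg data cs) := by
  obtain ⟨c0, L, hL⟩ : ∃ c0 L, cs ++ [data.length] = c0 :: L := by
    cases cs <;> exact ⟨_, _, rfl⟩
  have hshift : cs.map (· + 1) ++ [(w :: data).length] = (c0 + 1) :: L.map (· + 1) := by
    rw [show (w :: data).length = data.length + 1 from rfl]
    rw [show (cs.map (· + 1) ++ [data.length + 1] : List Nat) = (cs ++ [data.length]).map (· + 1) from by simp]
    rw [hL]; rfl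
  have hhd : PySem.List.slice (w :: data) (some ((0 : Nat) : Int)) (some ((c0 + 1 : Nat) : Int))
      = w :: PySem.List.slice data (some ((0 : Nat) : Int)) (some ((c0 : Nat) : Int)) := by
    rw [PySem.List.slice_natCast, PySem.List.slice_natCast]
    simp
  have hsh := seg_shift w data (c0 :: L)
  rw [List.map_cons, intsOf_cons, intsOf_cons] at hsh
  unfold fullSeg
  rw [List.cons_append, List.cons_append, hshift, hL]
  rw [intsOf_cons, intsOf_cons, segOf_cons2, intsOf_cons, intsOf_cons, segOf_cons2]
  rw [hhd, hsh]
  rfl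

theorem fullSeg_zero (data : List Int) (cs : List Nat) :
    fullSeg data (0 :: cs) = [] :: fullSeg data cs := by
  obtain ⟨c0, L, hL⟩ : ∃ c0 L, cs ++ [data.length] = c0 :: L := by
    cases cs <;> exact ⟨_, _, rfl⟩
  unfold fullSeg
  rw [List.cons_append, List.cons_append, hL]
  rw [intsOf_cons, intsOf_cons, segOf_cons2]
  congr 1

theorem fullSeg_refF (e : Int) (data : List Int) :
    fullSeg data ((cutsAllN e data).map (· + 1)) = refF e data := by
  induction data with
  | nil => rfl
  | cons w rest ih =>
    by_cases hw : w = e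
    · simp only [cutsAllN, refF, if_pos hw]
      rw [List.singleton_append,
          show ((0 :: (cutsAllN e rest).map (· + 1)).map (· + 1) : List Nat)
            = ((0 :: (cutsAllN e rest).map (· + 1)).map (· + 1)) from rfl,
          fullSeg_cons, fullSeg_zero, ih, hw]
      cases refF e rest <;> simp [consHead]
    · simp only [cutsAllN, refF, if_neg hw]
      rw [List.nil_append, fullSeg_cons, ih]

theorem fullSeg_refR (e : Int) (data : List Int) :
    fullSeg data (cutsAllN e data) = refR e data := by
  induction data with
  | nil => rfl
  | cons w rest ih =>
    by_cases hw : w = e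
    · simp only [cutsAllN, refR, if_pos hw]
      rw [List.singleton_append, fullSeg_zero, fullSeg_cons, ih]
    · simp only [cutsAllN, refR, if_neg hw]
      rw [List.nil_append, fullSeg_cons, ih]

theorem enum_filter (e : Int) (data : List Int) (s : Int) :
    ((PySem.List.enumerate data s).filter (fun p => p.2 == e)).map (fun p => p.1) =
      (intsOf (cutsAllN e data)).map (fun n => n + s) := by
  induction data generalizing s with
  | nil => simp [PySem.List.enumerate, cutsAllN, intsOf]
  | cons w rest ih =>
    rw [PySem.List.enumerate_cons, List.filter_cons]
    by_cases hw : w = e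
    · rw [if_pos (by simp [hw])]
      simp only [cutsAllN, if_pos hw, List.singleton_append]
      rw [intsOf_cons, List.map_cons, List.map_cons]
      congr 1
      · simp
      · rw [ih (s + 1), intsOf_shift, List.map_map]
        apply List.map_congr_left
        intro n _
        simp only [Function.comp_apply]
        ring
    · rw [if_neg (by simp [hw])]
      simp only [cutsAllN, if_neg hw, List.nil_append]
      rw [ih (s + 1), intsOf_shift, List.map_map]
      apply List.map_congr_left
      intro n _
      simp only [Function.comp_apply]
      ring

theorem enum_filter_pos (e : Int) (data : List Int) (s : Int) (hs : 1 ≤ s) :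
    (PySem.List.enumerate data s).filter (fun p => p.2 == e && decide (0 < p.1)) =
      (PySem.List.enumerate data s).filter (fun p => p.2 == e) := by
  induction data generalizing s with
  | nil => simp [PySem.List.enumerate]
  | cons w rest ih =>
    rw [PySem.List.enumerate_cons, List.filter_cons, List.filter_cons]
    have hp : decide ((0 : Int) < s) = true := by simp; omega
    rw [ih (s + 1) (by omega)]
    simp [hp]

theorem cutsAll_empty (e : Int) (data : List Int) :
    cutsAllN e data = [] ↔ ∀ x ∈ data, ¬ x = e := by
  induction data with
  | nil => simp [cutsAllN]
  | cons w rest ih =>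
    by_cases hw : w = e <;> simp [cutsAllN, hw, ih]

theorem foldA_full_F (e : Int) (data : List Int) :
    ∀ sl ns,
      (data.foldl (pvStepA e false) (sl, ns)).1 ++ [(data.foldl (pvStepA e false) (sl, ns)).2] =
        sl ++ consHead ns (refF e data) := by
  induction data with
  | nil => intro sl ns; simp [consHead, List.foldl_nil, refF]
  | cons w rest ih =>
    intro sl ns
    rw [List.foldl_cons]
    by_cases hw : w = e
    · have hstep : pvStepA e false (sl, ns) w = (sl ++ [ns ++ [w]], []) := by
        simp [pvStepA, hw]
      rw [hstep, ih, consHead_nil (refF_ne_nil e rest),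
          show refF e (w :: rest) = [w] :: refF e rest from by simp [refF, hw]]
      simp [consHead]
    · have hstep : pvStepA e false (sl, ns) w = (sl, ns ++ [w]) := by
        simp [pvStepA, hw]
      rw [hstep, ih,
          show refF e (w :: rest) = consHead [w] (refF e rest) from by simp [refF, hw],
          consHead_consHead]

theorem foldA_full_R (e : Int) (data : List Int) :
    ∀ sl ns, ns ≠ [] →
      (data.foldl (pvStepA e true) (sl, ns)).1 ++ [(data.foldl (pvStepA e true) (sl, ns)).2] =
        sl ++ consHead ns (refR e data) := by
  induction data with
  | nil => intro sl ns _; simp [consHead, List.foldl_nil, refR]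
  | cons w rest ih =>
    intro sl ns hns
    rw [List.foldl_cons]
    by_cases hw : w = e
    · have hstep : pvStepA e true (sl, ns) w = (sl ++ [ns], [w]) := by
        have : 0 < ns.length := by cases ns <;> simp_all
        simp [pvStepA, hw, this]
      rw [hstep, ih _ _ (by simp),
          show refR e (w :: rest) = [] :: consHead [w] (refR e rest) from by simp [refR, hw]]
      simp [consHead]
    · have hstep : pvStepA e true (sl, ns) w = (sl, ns ++ [w]) := by
        simp [pvStepA, hw]
      rw [hstep, ih _ _ (by simp),
          show refR e (w :: rest) = consHead [w] (refR e rest) from by simp [refR, hw],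
          consHead_consHead]

theorem foldA_empty_F (e : Int) (data : List Int) :
    ∀ sl ns, ((data.foldl (pvStepA e false) (sl, ns)).1 = [] ↔ sl = [] ∧ ∀ x ∈ data, ¬ x = e) := by
  induction data with
  | nil => intro sl ns; simp
  | cons w rest ih =>
    intro sl ns
    rw [List.foldl_cons]
    by_cases hw : w = e
    · have hstep : pvStepA e false (sl, ns) w = (sl ++ [ns ++ [w]], []) := by
        simp [pvStepA, hw]
      rw [hstep, ih]
      simp [hw]
    · have hstep : pvStepA e false (sl, ns) w = (sl, ns ++ [w]) := by
        simp [pvStepA, hw]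
      rw [hstep, ih]
      simp [hw]

theorem foldA_empty_R (e : Int) (data : List Int) :
    ∀ sl ns, ns ≠ [] →
      ((data.foldl (pvStepA e true) (sl, ns)).1 = [] ↔ sl = [] ∧ ∀ x ∈ data, ¬ x = e) := by
  induction data with
  | nil => intro sl ns _; simp
  | cons w rest ih =>
    intro sl ns hns
    rw [List.foldl_cons]
    by_cases hw : w = e
    · have hstep : pvStepA e true (sl, ns) w = (sl ++ [ns], [w]) := by
        have : 0 < ns.length := by cases ns <;> simp_all
        simp [pvStepA, hw, this]
      rw [hstep, ih _ _ (by simp)]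
      simp [hw]
    · have hstep : pvStepA e true (sl, ns) w = (sl, ns ++ [w]) := by
        simp [pvStepA, hw]
      rw [hstep, ih _ _ (by simp)]
      simp [hw]

theorem cutsF_eq (e : Int) (data : List Int) :
    ((PySem.List.enumerate data 0).filter (fun p => p.2 == e)).map (fun p => p.1 + 1) =
      intsOf ((cutsAllN e data).map (· + 1)) := by
  have hcomp : (fun p => p.1 + 1 : Int × Int → Int) = (fun n => n + 1) ∘ (fun p : Int × Int => p.1) := rfl
  rw [hcomp, ← List.map_map, enum_filter e data 0, intsOf_shift, List.map_map]
  apply List.map_congr_left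
  intro n _
  simp

theorem cutsR_cons (e w : Int) (rest : List Int) :
    ((PySem.List.enumerate (w :: rest) 0).filter (fun p => p.2 == e && decide (0 < p.1))).map (fun p => p.1) =
      intsOf ((cutsAllN e rest).map (· + 1)) := by
  rw [PySem.List.enumerate_cons, List.filter_cons, if_neg (by simp)]
  rw [show (0 : Int) + 1 = 1 from by norm_num]
  rw [enum_filter_pos e rest 1 (by norm_num), enum_filter e rest 1, intsOf_shift]

theorem bounds_eq (data : List Int) (cs : List Nat) :
    (0 : Int) :: intsOf cs ++ [(data.length : Int)] = intsOf (0 :: cs ++ [data.length]) := by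
  rw [show (0 :: cs ++ [data.length] : List Nat) = 0 :: (cs ++ [data.length]) from rfl,
      intsOf_cons, intsOf_append, intsOf_cons, intsOf_nil]
  simp

theorem intsOf_eq_nil (cs : List Nat) : intsOf cs = [] ↔ cs = [] := by
  cases cs <;> simp [intsOf]

-- ===== VERDICT (by name: the statement is the Claim_ definition above) =====
theorem get_sentence_list_spec : Claim_equal_get_sentence_list := by
  unfold Claim_equal_get_sentence_list
  intro data e rev _
  unfold Spec_get_sentence_list get_sentence_list get_sentence_list_alt
  rw [PySem.List.foldl_pyRange_zero_pyGetD]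
  dsimp only
  cases rev with
  | false =>
    rw [if_neg (show ¬(false = true) from by simp), cutsF_eq]
    by_cases hne : ∀ x ∈ data, ¬ x = e
    · have hc : cutsAllN e data = [] := (cutsAll_empty e data).mpr hne
      have hsl : (data.foldl (pvStepA e false) ([], [])).1 = [] :=
        (foldA_empty_F e data [] []).mpr ⟨rfl, hne⟩
      rw [hc, hsl]
      simp [intsOf]
    · have hc : ((cutsAllN e data).map (· + 1)) ≠ [] := by
        intro h
        exact hne ((cutsAll_empty e data).mp (by simpa using h))
      have hsl : (data.foldl (pvStepA e false) ([], [])).1 ≠ [] := by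
        intro h
        exact hne ((foldA_empty_F e data [] []).mp h).2
      have hfull := foldA_full_F e data [] []
      rw [consHead_nil (refF_ne_nil e data), List.nil_append] at hfull
      rw [if_pos (show 0 < (data.foldl (pvStepA e false) ([], [])).1.length from by
        cases h : (data.foldl (pvStepA e false) ([], [])).1 <;> simp_all)]
      rw [hfull]
      rw [if_neg (show ¬((intsOf ((cutsAllN e data).map (· + 1))).isEmpty = true) from by
        simp only [List.isEmpty_iff]; intro h; exact hc ((intsOf_eq_nil _).mp h))]
      rw [bounds_eq]
      have h2 := fullSeg_refF e data
      unfold fullSeg segOf at h2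
      exact h2.symm
  | true =>
    rw [if_pos (show (true = true) from rfl)]
    cases data with
    | nil => simp [PySem.List.enumerate]
    | cons w rest =>
      rw [cutsR_cons, List.foldl_cons]
      have hstep : pvStepA e true ([], []) w = ([], [w]) := by
        simp [pvStepA]
      rw [hstep]
      by_cases hne : ∀ x ∈ rest, ¬ x = e
      · have hc : cutsAllN e rest = [] := (cutsAll_empty e rest).mpr hne
        have hsl : (rest.foldl (pvStepA e true) ([], [w])).1 = [] :=
          (foldA_empty_R e rest [] [w] (by simp)).mpr ⟨rfl, hne⟩
        rw [hc, hsl]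
        simp [intsOf]
      · have hc : ((cutsAllN e rest).map (· + 1)) ≠ [] := by
          intro h
          exact hne ((cutsAll_empty e rest).mp (by simpa using h))
        have hsl : (rest.foldl (pvStepA e true) ([], [w])).1 ≠ [] := by
          intro h
          exact hne ((foldA_empty_R e rest [] [w] (by simp)).mp h).2
        have hfull := foldA_full_R e rest [] [w] (by simp)
        rw [List.nil_append] at hfull
        rw [if_pos (show 0 < (rest.foldl (pvStepA e true) ([], [w])).1.length from by
          cases h : (rest.foldl (pvStepA e true) ([], [w])).1 <;> simp_all)]
        rw [hfull]
        rw [if_neg (show ¬((intsOf ((cutsAllN e rest).map (· + 1))).isEmpty = true) from by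
          simp only [List.isEmpty_iff]; intro h; exact hc ((intsOf_eq_nil _).mp h))]
        rw [bounds_eq]
        have h1 := fullSeg_cons w rest (cutsAllN e rest)
        have h2 := fullSeg_refR e rest
        unfold fullSeg segOf at h1 h2
        rw [h1, h2]
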